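-- pv_equiv track=rewrite | github.com/AngusMonroe/knowledge-driven-dialogue-lic2019 | answer_rank/feature_util.py | entity_overlap_num
-- ===== SOURCE A (Python) =====
-- from collections import Counter
--
-- def entity_overlap_num(p, gk):
--     count = Counter()
--     gk = gk.split()
--     count.update(gk)
--     p = p.split()
--     n = 0
--     for word in p:
--         if count.get(word) is not None:
--             n+=1
--     return n
-- ===== SOURCE B (Python) =====
-- def entity_overlap_num(p, gk):
--     ps = sorted(p.split())
--     gs = sorted(gk.split())
--     i = j = 0
--     n = 0
--     while i < len(ps) and j < len(gs):
--         if ps[i] < gs[j]: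
--             i += 1
--         elif gs[j] < ps[i]:
--             j += 1
--         else:
--             n += 1
--             i += 1
--     return n
-- ===== Notes on version B (the rewrite author's own statement) =====
-- stated objective: alternative
-- what changed: B sorts both token lists and counts matches with a two-pointer merge scan over the sorted sequences, instead of hashing gk's tokens into a Counter and testing each word of p for membership.
import Mathlib
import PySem

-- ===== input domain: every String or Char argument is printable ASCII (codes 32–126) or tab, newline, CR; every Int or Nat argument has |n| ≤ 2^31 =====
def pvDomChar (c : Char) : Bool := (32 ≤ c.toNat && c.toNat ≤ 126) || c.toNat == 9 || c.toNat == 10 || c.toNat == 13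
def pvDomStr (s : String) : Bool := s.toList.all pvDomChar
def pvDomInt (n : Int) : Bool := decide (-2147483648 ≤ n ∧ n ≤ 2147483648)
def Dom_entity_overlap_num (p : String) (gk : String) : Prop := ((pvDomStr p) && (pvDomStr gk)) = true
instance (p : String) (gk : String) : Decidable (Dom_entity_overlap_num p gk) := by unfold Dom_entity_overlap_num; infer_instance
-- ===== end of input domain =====

-- B sorts both token lists and counts matches with a two-pointer merge scan instead of A's Counter lookup loop; alternative algorithm, same behaviour.


-- ===== PORT A =====
-- count = Counter(); count.update(gk.split()) is PySem.Dict.counter; the loop over p.split() counts words whose lookup is not None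
def entity_overlap_num (p : String) (gk : String) : Int :=
  let count : PySem.Dict String Int := PySem.Dict.counter (PySem.Str.split₀ gk)
  let pw := PySem.Str.split₀ p
  pw.foldl (fun n word => if (count.get? word).isSome then n + 1 else n) 0

-- ===== PORT B =====
-- B's while loop advances one of the two sorted sequences each step; ported as the
-- corresponding recursion consuming the head of the advanced list (same state: the
-- remaining suffixes and the accumulator n).
def pvMergeCount : List String → List String → Int → Int
  | [], _, n => n
  | _ :: _, [], n => n
  | a :: as, b :: bs, n =>
    if a < b then pvMergeCount as (b :: bs) n
    else if b < a then pvMergeCount (a :: as) bs n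
    else pvMergeCount as (b :: bs) (n + 1)

def entity_overlap_num_alt (p : String) (gk : String) : Int :=
  let ps := PySem.List.sorted (PySem.Str.split₀ p) (fun x => x) false
  let gs := PySem.List.sorted (PySem.Str.split₀ gk) (fun x => x) false
  pvMergeCount ps gs 0

-- ===== PRECONDITION & SPEC =====
def Spec_entity_overlap_num (p : String) (gk : String) (out : Int) : Prop := out = entity_overlap_num_alt p gk
instance (p : String) (gk : String) (out : Int) : Decidable (Spec_entity_overlap_num p gk out) := by unfold Spec_entity_overlap_num; infer_instance

-- ===== CLAIM (what is proved, stated in full; the proofs are below) =====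
def Claim_equal_entity_overlap_num : Prop := ∀ (p : String) (gk : String), Dom_entity_overlap_num p gk → Spec_entity_overlap_num p gk (entity_overlap_num p gk)

-- ===== LEMMAS AND PROOFS =====

-- A's loop is countP of its predicate
theorem pv_foldl_count (l : List String) (c : String → Bool) (a : Int) :
    l.foldl (fun n w => if c w then n + 1 else n) a = a + (l.countP c : Int) := by
  induction l generalizing a with
  | nil => simp
  | cons x t ih =>
    simp only [List.foldl_cons, List.countP_cons, ih]
    by_cases h : c x = true
    · simp only [h, if_pos]
      push_cast
      ring
    · simp [h]

-- the merge scan over sorted lists computes n + (number of xs-elements present in ys)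
theorem pv_mergeCount_eq (xs ys : List String) (n : Int)
    (hx : xs.Pairwise (· ≤ ·)) (hy : ys.Pairwise (· ≤ ·)) :
    pvMergeCount xs ys n = n + (xs.countP (fun w => decide (w ∈ ys)) : Int) := by
  induction xs, ys, n using pvMergeCount.induct with
  | case1 ys n => simp [pvMergeCount]
  | case2 a as n => simp [pvMergeCount]
  | case3 a as b bs n hab ih =>
    -- a < b: a is below every element of b :: bs, so a ∉ b :: bs
    have ha : a ∉ b :: bs := by
      intro hmem
      rcases List.mem_cons.mp hmem with h | h
      · exact absurd h (ne_of_lt hab)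
      · exact absurd ((List.pairwise_cons.mp hy).1 a h) (not_le.mpr hab)
    rw [pvMergeCount, if_pos hab,
      ih (List.pairwise_cons.mp hx).2 hy, List.countP_cons]
    simp [ha]
  | case4 a as b bs n hab hba ih =>
    -- b < a: b is below a and (by sortedness of a :: as) below every element of as,
    -- so dropping b changes no membership test of a :: as
    have hbmem : ∀ w ∈ a :: as, (w ∈ b :: bs) = (w ∈ bs) := by
      intro w hw
      have haw : a ≤ w := by
        rcases List.mem_cons.mp hw with h | h
        · exact h.ge
        · exact (List.pairwise_cons.mp hx).1 w h
      have : w ≠ b := fun h => absurd (h ▸ haw) (not_le.mpr hba)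
      simp [List.mem_cons, this]
    rw [pvMergeCount, if_neg hab, if_pos hba,
      ih hx (List.pairwise_cons.mp hy).2]
    congr 2
    exact List.countP_congr (fun w hw => by simp [hbmem w hw])
  | case5 a as b bs n hab hba ih =>
    have hab' : a = b := le_antisymm (not_lt.mp hba) (not_lt.mp hab)
    rw [pvMergeCount, if_neg hab, if_neg hba,
      ih (List.pairwise_cons.mp hx).2 hy, List.countP_cons]
    have : a ∈ b :: bs := by simp [hab']
    simp [this]
    ring

-- ===== VERDICT (by name: the statement is the Claim_ definition above) =====
theorem entity_overlap_num_spec : Claim_equal_entity_overlap_num := by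
  intro p gk _
  unfold Spec_entity_overlap_num entity_overlap_num entity_overlap_num_alt
  rw [pv_foldl_count, zero_add,
    pv_mergeCount_eq _ _ _ (PySem.List.sorted_pairwise ..) (PySem.List.sorted_pairwise ..),
    zero_add]
  congr 1
  calc List.countP (fun w => ((PySem.Dict.counter (PySem.Str.split₀ gk)).get? w).isSome)
          (PySem.Str.split₀ p)
      = List.countP (fun w => decide (w ∈ PySem.List.sorted (PySem.Str.split₀ gk) (fun x => x) false))
          (PySem.Str.split₀ p) := by
        refine List.countP_congr (fun x _ => ?_)
        rw [← PySem.Dict.contains_eq_isSome_get?, PySem.Dict.contains_counter]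
        simp [PySem.List.mem_sorted]
    _ = List.countP (fun w => decide (w ∈ PySem.List.sorted (PySem.Str.split₀ gk) (fun x => x) false))
          (PySem.List.sorted (PySem.Str.split₀ p) (fun x => x) false) :=
        ((PySem.List.sorted_perm ..).countP_eq _).symm
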